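-- pv_equiv track=rewrite | github.com/mmh132/ProjectEuler | work/P540.py | tripct
-- ===== SOURCE A (Python) =====
-- from math import gcd
--
-- def tripct(cap):
--     m,n = 1,1
--     tot = 0
--     while m**2+n**2 < cap:
--         while m**2 + n**2 < cap:
--             if gcd(m,n) == 1 and (m%2,n%2) != (1,1): tot += 1
--             n += 1
--         m += 1
--         n = m+1
--     return tot
-- ===== SOURCE B (Python) =====
-- from math import isqrt
--
--
-- def tripct(cap):
--     return _coprime(cap) - _coprimeodd(cap)
--
--
-- def _allpairs(x):
--     # pairs 1 <= m < n with m*m + n*n < x (no gcd/parity condition)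
--     t = 0
--     for n in range(2, isqrt(x - 2) + 1):
--         t += min(n - 1, isqrt(x - 1 - n * n))
--     return t
--
--
-- def _oddpairs(x):
--     # pairs 1 <= m < n, both odd, with m*m + n*n < x
--     t = 0
--     for n in range(3, isqrt(x - 2) + 1):
--         if n % 2 == 1:
--             t += (min(n - 1, isqrt(x - 1 - n * n)) + 1) // 2
--     return t
--
--
-- def _coprime(x):
--     # coprime pairs 1 <= m < n with m*m + n*n < x, by Legendre-style
--     # recursive Moebius inversion over the gcd: every pair scales down
--     # to a unique coprime pair, so subtract the counts of gcd >= 2.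
--     if x <= 5:
--         return 0
--     t = _allpairs(x)
--     for g in range(2, isqrt((x - 1) // 5) + 1):
--         t -= _coprime((x - 1) // (g * g) + 1)
--     return t
--
--
-- def _coprimeodd(x):
--     # coprime both-odd pairs with m*m + n*n < x; the gcd of two odds is odd
--     if x <= 10:
--         return 0
--     t = _oddpairs(x)
--     for g in range(3, isqrt((x - 1) // 10) + 1):
--         if g % 2 == 1:
--             t -= _coprimeodd((x - 1) // (g * g) + 1)
--     return t
-- ===== Notes on version B (the rewrite author's own statement) =====
-- stated objective: faster
-- what changed: Replaces A's per-pair double scan of the quarter disk by recursive Moebius (Legendre-style) inversion over the gcd: isqrt-bounded lattice row counts give the total and both-odd pair counts under a bound, and the coprime counts are obtained by recursively subtracting the counts of scaled-down bounds, never enumerating pairs.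
import Mathlib
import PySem

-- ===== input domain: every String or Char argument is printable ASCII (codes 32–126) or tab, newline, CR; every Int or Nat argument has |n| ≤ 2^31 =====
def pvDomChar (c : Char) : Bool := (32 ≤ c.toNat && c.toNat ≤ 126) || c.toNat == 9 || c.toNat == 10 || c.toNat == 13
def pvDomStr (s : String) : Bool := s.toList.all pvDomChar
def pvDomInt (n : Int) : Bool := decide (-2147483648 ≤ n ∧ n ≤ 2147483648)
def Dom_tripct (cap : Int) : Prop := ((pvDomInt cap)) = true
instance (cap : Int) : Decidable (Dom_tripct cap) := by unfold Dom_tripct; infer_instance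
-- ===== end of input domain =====

-- B counts the pairs by recursive Moebius (Legendre-style) inversion over the gcd with
-- isqrt-bounded lattice row counts, instead of A's per-pair double loop (objective: faster).

-- a ≤ a^2 over ℤ (cited by the ports' termination proofs)
theorem pv_self_le_sq (a : Int) : a ≤ a ^ 2 := Int.le_self_sq a

-- under the loop guard m^2+n^2 < cap the loop variable is below cap (cited by decreasing_by)
theorem pv_lt_of_guard {m n cap : Int} (h : m ^ 2 + n ^ 2 < cap) : n < cap := by
  have := pv_self_le_sq n
  nlinarith [sq_nonneg m]

-- the recursive calls of B shrink: (x-1)//(g*g) + 1 < x for 2 ≤ g, 5 < x (cited by decreasing_by)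
theorem pv_shrink {x g : Int} (hx : ¬ x ≤ 5) (hg : 2 ≤ g) :
    (PySem.Int.floordiv (x - 1) (g * g) + 1).toNat < x.toNat := by
  have hgg : (4 : Int) ≤ g * g := by nlinarith
  rw [PySem.Int.floordiv_eq_ediv_of_pos (by omega)]
  have hq0 : 0 ≤ (x - 1) / (g * g) := Int.ediv_nonneg (by omega) (by omega)
  have hqm : (x - 1) / (g * g) * (g * g) ≤ x - 1 := Int.ediv_mul_le (x - 1) (by omega)
  have h4 : (x - 1) / (g * g) * 4 ≤ (x - 1) / (g * g) * (g * g) := by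
    exact mul_le_mul_of_nonneg_left hgg hq0
  omega

-- ===== PORT A =====
-- inner 'while m**2+n**2 < cap: …; n += 1'
def tripctInner (cap m n tot : Int) : Int :=
  if h : m ^ 2 + n ^ 2 < cap then
    tripctInner cap m (n + 1)
      (if Int.gcd m n = 1 ∧ (m % 2, n % 2) ≠ ((1 : Int), (1 : Int)) then tot + 1 else tot)
  else tot
termination_by (cap - n).toNat
decreasing_by
  have := pv_lt_of_guard h
  omega

-- outer 'while m**2+n**2 < cap: <inner>; m += 1; n = m+1'
def tripctOuter (cap m n tot : Int) : Int :=
  if h : m ^ 2 + n ^ 2 < cap then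
    tripctOuter cap (m + 1) (m + 2) (tripctInner cap m n tot)
  else tot
termination_by (cap - m).toNat
decreasing_by
  have : m < cap := pv_lt_of_guard (m := n) (by linarith)
  omega

def tripct (cap : Int) : Int := tripctOuter cap 1 1 0

-- ===== PORT B =====
-- math.isqrt (exact for the nonnegative arguments B uses)
def pvIsqrt (x : Int) : Int := (Nat.sqrt x.toNat : Int)

-- _allpairs: 'for n in range(2, isqrt(x-2)+1): t += min(n-1, isqrt(x-1-n*n))'
def pvAllpairs (x : Int) : Int :=
  (PySem.List.pyRange 2 (pvIsqrt (x - 2) + 1) 1).foldl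
    (fun t n => t + min (n - 1) (pvIsqrt (x - 1 - n * n))) 0

-- _oddpairs: 'for n in range(3, isqrt(x-2)+1): if n % 2 == 1: t += (min(n-1, isqrt(x-1-n*n))+1)//2'
def pvOddpairs (x : Int) : Int :=
  (PySem.List.pyRange 3 (pvIsqrt (x - 2) + 1) 1).foldl
    (fun t n =>
      if PySem.Int.mod n 2 = 1 then
        t + PySem.Int.floordiv (min (n - 1) (pvIsqrt (x - 1 - n * n)) + 1) 2
      else t) 0

-- _coprime: recursive inversion over gcd g = 2 .. isqrt((x-1)//5)
def pvCoprime (x : Int) : Int :=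
  if x ≤ 5 then 0
  else
    (PySem.List.pyRange 2 (pvIsqrt (PySem.Int.floordiv (x - 1) 5) + 1) 1).attach.foldl
      (fun t g => t - pvCoprime (PySem.Int.floordiv (x - 1) (g.1 * g.1) + 1)) (pvAllpairs x)
termination_by x.toNat
decreasing_by
  exact pv_shrink (by assumption) ((PySem.List.mem_pyRange_one.mp g.2).1)

-- _coprimeodd: recursive inversion over odd gcd g = 3 .. isqrt((x-1)//10)
def pvCoprimeOdd (x : Int) : Int :=
  if x ≤ 10 then 0
  else
    (PySem.List.pyRange 3 (pvIsqrt (PySem.Int.floordiv (x - 1) 10) + 1) 1).attach.foldl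
      (fun t g =>
        if PySem.Int.mod g.1 2 = 1 then
          t - pvCoprimeOdd (PySem.Int.floordiv (x - 1) (g.1 * g.1) + 1)
        else t) (pvOddpairs x)
termination_by x.toNat
decreasing_by
  exact pv_shrink (by omega) (by have := (PySem.List.mem_pyRange_one.mp g.2).1; omega)

def tripct_alt (cap : Int) : Int := pvCoprime cap - pvCoprimeOdd cap

-- ===== PRECONDITION & SPEC =====
def Spec_tripct (cap : Int) (out : Int) : Prop := out = tripct_alt cap
instance (cap : Int) (out : Int) : Decidable (Spec_tripct cap out) := by unfold Spec_tripct; infer_instance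

-- ===== CLAIM (what is proved, stated in full; the proofs are below) =====
def Claim_equal_tripct : Prop := ∀ (cap : Int), Dom_tripct cap → Spec_tripct cap (tripct cap)

-- ===== LEMMAS AND PROOFS =====

-- indicator used to characterise A's inner loop (no m<n constraint)
def pvH (cap m j : Int) : Int :=
  if m ^ 2 + j ^ 2 < cap ∧ Int.gcd m j = 1 ∧ (m % 2, j % 2) ≠ ((1 : Int), (1 : Int)) then 1 else 0

-- the pair predicate behind all the counts: m<n, m²+n²<x, optionally both odd (po), optionally coprime (pg)
abbrev pvP (x : Int) (po pg : Bool) (m n : Int) : Prop :=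
  m < n ∧ m ^ 2 + n ^ 2 < x ∧ (po = false ∨ (m % 2 = 1 ∧ n % 2 = 1)) ∧ (pg = false ∨ Int.gcd m n = 1)

-- the number of pairs in the 1..x grid satisfying pvP
noncomputable def pvCnt (x : Int) (po pg : Bool) : Int :=
  ∑ n ∈ Finset.Icc 1 x, ∑ m ∈ Finset.Icc 1 x, if pvP x po pg m n then (1 : Int) else 0

theorem pv_H_zero_of_ge {cap m j : Int} (h : ¬ m ^ 2 + j ^ 2 < cap) : pvH cap m j = 0 := by
  unfold pvH; rw [if_neg]; intro hc; exact h hc.1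

theorem pv_Icc_insert {n cap : Int} (h : n ≤ cap) :
    Finset.Icc n cap = insert n (Finset.Icc (n + 1) cap) := by
  ext x; simp only [Finset.mem_Icc, Finset.mem_insert]; omega

theorem pv_not_mem_Icc_succ (n cap : Int) : n ∉ Finset.Icc (n + 1) cap := by
  simp only [Finset.mem_Icc]; omega

theorem pv_inner_eq (cap m : Int) (k : ℕ) :
    ∀ n tot : Int, (cap - n).toNat ≤ k → 1 ≤ n →
      tripctInner cap m n tot = tot + ∑ j ∈ Finset.Icc n cap, pvH cap m j := by
  induction k with
  | zero =>
    intro n tot hk hn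
    have hcap : cap ≤ n := by omega
    have hg : ¬ m ^ 2 + n ^ 2 < cap := by nlinarith [sq_nonneg m, Int.le_self_sq n]
    rw [tripctInner, dif_neg hg, Finset.sum_eq_zero, add_zero]
    intro j hj
    simp only [Finset.mem_Icc] at hj
    apply pv_H_zero_of_ge
    nlinarith [sq_nonneg m, Int.le_self_sq j]
  | succ k ih =>
    intro n tot hk hn
    rw [tripctInner]
    split_ifs with hg hp
    · have hnc : n < cap := pv_lt_of_guard hg
      rw [ih (n + 1) _ (by omega) (by omega), pv_Icc_insert (n := n) (cap := cap) (by omega),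
        Finset.sum_insert (pv_not_mem_Icc_succ n cap),
        show pvH cap m n = 1 from by unfold pvH; rw [if_pos ⟨hg, hp⟩]]
      ring
    · have hnc : n < cap := pv_lt_of_guard hg
      rw [ih (n + 1) _ (by omega) (by omega), pv_Icc_insert (n := n) (cap := cap) (by omega),
        Finset.sum_insert (pv_not_mem_Icc_succ n cap),
        show pvH cap m n = 0 from by unfold pvH; rw [if_neg (fun hc => hp hc.2)]]
      ring
    · rw [Finset.sum_eq_zero, add_zero]
      intro j hj
      simp only [Finset.mem_Icc] at hj
      apply pv_H_zero_of_ge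
      have h1 : n ^ 2 ≤ j ^ 2 := by
        nlinarith [mul_nonneg (by omega : (0:Int) ≤ j - n) (by omega : (0:Int) ≤ j + n)]
      intro hc; exact hg (by nlinarith)

theorem pv_outer_eq (cap : Int) (k : ℕ) :
    ∀ m tot : Int, (cap - m).toNat ≤ k → 2 ≤ m →
      tripctOuter cap m (m + 1) tot =
        tot + ∑ a ∈ Finset.Icc m cap, ∑ j ∈ Finset.Icc (a + 1) cap, pvH cap a j := by
  induction k with
  | zero =>
    intro m tot hk hm
    have hcap : cap ≤ m := by omega
    have hg : ¬ m ^ 2 + (m + 1) ^ 2 < cap := by nlinarith [Int.le_self_sq m, sq_nonneg (m + 1)]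
    rw [tripctOuter, dif_neg hg, Finset.sum_eq_zero, add_zero]
    intro a ha
    simp only [Finset.mem_Icc] at ha
    rw [Finset.Icc_eq_empty (by omega), Finset.sum_empty]
  | succ k ih =>
    intro m tot hk hm
    rw [tripctOuter]
    split_ifs with hg
    · have hmc : m < cap := pv_lt_of_guard (m := m + 1) (by linarith)
      rw [show m + 2 = (m + 1) + 1 from by ring,
        ih (m + 1) _ (by omega) (by omega),
        pv_inner_eq cap m ((cap - (m + 1)).toNat) (m + 1) tot (by omega) (by omega),
        pv_Icc_insert (n := m) (cap := cap) (by omega),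
        Finset.sum_insert (pv_not_mem_Icc_succ m cap)]
      ring
    · rw [Finset.sum_eq_zero, add_zero]
      intro a ha
      simp only [Finset.mem_Icc] at ha
      rw [Finset.sum_eq_zero]
      intro j hj
      simp only [Finset.mem_Icc] at hj
      apply pv_H_zero_of_ge
      intro hc
      have h1 : m ^ 2 ≤ a ^ 2 := by
        nlinarith [mul_nonneg (by omega : (0:Int) ≤ a - m) (by omega : (0:Int) ≤ a + m)]
      have h2 : (m + 1) ^ 2 ≤ j ^ 2 := by
        nlinarith [mul_nonneg (by omega : (0:Int) ≤ j - (m + 1)) (by omega : (0:Int) ≤ j + (m + 1))]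
      exact hg (by nlinarith)

theorem pv_A_eq (cap : Int) :
    tripct cap = ∑ a ∈ Finset.Icc 1 cap, ∑ j ∈ Finset.Icc (a + 1) cap, pvH cap a j := by
  rw [tripct, tripctOuter]
  split_ifs with hg
  · have hc3 : 2 < cap := by nlinarith
    rw [show (1 : Int) + 2 = 2 + 1 from by ring,
      show (1 : Int) + 1 = 2 from by ring,
      pv_outer_eq cap ((cap - 2).toNat) 2 _ (by omega) (by omega),
      pv_inner_eq cap 1 ((cap - 1).toNat) 1 0 (by omega) (by omega),
      pv_Icc_insert (n := 1) (cap := cap) (by omega),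
      Finset.sum_insert (pv_not_mem_Icc_succ 1 cap),
      Finset.sum_insert (pv_not_mem_Icc_succ 1 cap),
      show pvH cap 1 1 = 0 from by
        unfold pvH; rw [if_neg]; rintro ⟨-, -, h⟩; exact h (by decide)]
    push_cast
    ring
  · rw [Finset.sum_eq_zero]
    intro a ha
    simp only [Finset.mem_Icc] at ha
    rw [Finset.sum_eq_zero]
    intro j hj
    simp only [Finset.mem_Icc] at hj
    apply pv_H_zero_of_ge
    intro hc
    have h1 := Int.le_self_sq a
    have h2 := Int.le_self_sq j
    have h3 : ¬ (1:Int) ^ 2 + 1 ^ 2 < cap := hg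
    nlinarith

theorem pv_le_isqrt_iff {a x : Int} (ha : 0 ≤ a) (hx : 0 ≤ x) :
    a ≤ pvIsqrt x ↔ a ^ 2 ≤ x := by
  obtain ⟨a, rfl⟩ := Int.eq_ofNat_of_zero_le ha
  obtain ⟨x, rfl⟩ := Int.eq_ofNat_of_zero_le hx
  unfold pvIsqrt
  rw [Int.toNat_natCast, Nat.cast_le, Nat.le_sqrt]
  constructor <;> intro h <;> nlinarith

theorem pv_isqrt_le_self {x : Int} (hx : 0 ≤ x) : pvIsqrt x ≤ x := by
  obtain ⟨x, rfl⟩ := Int.eq_ofNat_of_zero_le hx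
  unfold pvIsqrt
  rw [Int.toNat_natCast, Nat.cast_le]
  exact Nat.sqrt_le_self x

theorem pv_isqrt_nonneg (x : Int) : 0 ≤ pvIsqrt x := Int.natCast_nonneg _

theorem pv_sum_map_pyRange (f : Int → Int) (k : ℕ) :
    ∀ lo hi : Int, (hi - lo).toNat ≤ k →
      ((PySem.List.pyRange lo hi 1).map f).sum = ∑ x ∈ Finset.Icc lo (hi - 1), f x := by
  induction k with
  | zero =>
    intro lo hi hk
    rw [PySem.List.pyRange_one_eq_nil (by omega), Finset.Icc_eq_empty (by omega)]
    simp
  | succ k ih =>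
    intro lo hi hk
    rcases le_or_gt hi lo with h | h
    · rw [PySem.List.pyRange_one_eq_nil h, Finset.Icc_eq_empty (by omega)]
      simp
    · rw [PySem.List.pyRange_one_cons h, List.map_cons, List.sum_cons,
        ih (lo + 1) hi (by omega),
        pv_Icc_insert (n := lo) (cap := hi - 1) (by omega),
        Finset.sum_insert (pv_not_mem_Icc_succ lo (hi - 1))]

-- a foldl that only subtracts is the initial value minus a sum
theorem pv_foldl_sub {α : Type} (F : α → Int) (l : List α) (init : Int) :
    l.foldl (fun t g => t - F g) init = init - (l.map F).sum := by
  induction l generalizing init with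
  | nil => simp
  | cons a l ih => simp [ih]; ring

-- a foldl that subtracts under a test is the initial value minus a sum of guarded terms
theorem pv_foldl_sub_if {α : Type} (c : α → Prop) [DecidablePred c] (F : α → Int) (l : List α) (init : Int) :
    l.foldl (fun t g => if c g then t - F g else t) init
      = init - (l.map (fun g => if c g then F g else 0)).sum := by
  induction l generalizing init with
  | nil => simp
  | cons a l ih =>
    simp only [List.foldl_cons, List.map_cons, List.sum_cons]
    split_ifs with h
    · rw [ih]; ring
    · rw [ih]; ring

-- Icc with its top element split off
theorem pv_Icc_insert_top {a b : Int} (h : a ≤ b) :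
    Finset.Icc a b = insert b (Finset.Icc a (b - 1)) := by
  ext x; simp only [Finset.mem_Icc, Finset.mem_insert]; omega

theorem pv_not_mem_Icc_pred (a b : Int) : b ∉ Finset.Icc a (b - 1) := by
  simp only [Finset.mem_Icc]; omega

-- number of integers in [1,K] is K (as a guarded sum over the larger grid [1,x])
theorem pv_count_interval (x K : Int) (h0 : 0 ≤ K) (hx : K ≤ x) :
    (∑ m ∈ Finset.Icc 1 x, if 1 ≤ m ∧ m ≤ K then (1 : Int) else 0) = K := by
  rw [← Finset.sum_subset (Finset.Icc_subset_Icc le_rfl hx)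
      (fun m hm hnm => by
        simp only [Finset.mem_Icc] at hm hnm
        rw [if_neg]; omega),
    Finset.sum_congr rfl (fun m hm => by
        simp only [Finset.mem_Icc] at hm
        rw [if_pos hm]),
    Finset.sum_const, Int.card_Icc, nsmul_eq_mul, mul_one]
  omega

-- number of odd integers in [1,K] is (K+1)/2 (downward induction on K)
theorem pv_count_odd_core (k : ℕ) : ∀ K : Int, K.toNat ≤ k → 0 ≤ K →
    (∑ m ∈ Finset.Icc 1 K, if m % 2 = 1 then (1 : Int) else 0) = (K + 1) / 2 := by
  induction k with
  | zero =>
    intro K hk h0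
    have : K = 0 := by omega
    subst this
    simp
  | succ k ih =>
    intro K hk h0
    rcases eq_or_lt_of_le h0 with h | h
    · rw [← h]; simp
    · rw [pv_Icc_insert_top (by omega), Finset.sum_insert (pv_not_mem_Icc_pred 1 K),
        ih (K - 1) (by omega) (by omega)]
      split_ifs with hp <;> omega

-- the same count as a guarded sum over the larger grid [1,x]
theorem pv_count_odd_interval (x K : Int) (h0 : 0 ≤ K) (hx : K ≤ x) :
    (∑ m ∈ Finset.Icc 1 x, if 1 ≤ m ∧ m ≤ K ∧ m % 2 = 1 then (1 : Int) else 0) = (K + 1) / 2 := by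
  have h1 : (∑ m ∈ Finset.Icc 1 K, if 1 ≤ m ∧ m ≤ K ∧ m % 2 = 1 then (1 : Int) else 0)
      = (∑ m ∈ Finset.Icc 1 x, if 1 ≤ m ∧ m ≤ K ∧ m % 2 = 1 then (1 : Int) else 0) :=
    Finset.sum_subset (Finset.Icc_subset_Icc le_rfl hx) (fun m hm hnm => by
      simp only [Finset.mem_Icc] at hm hnm
      rw [if_neg]; omega)
  have h2 : (∑ m ∈ Finset.Icc 1 K, if 1 ≤ m ∧ m ≤ K ∧ m % 2 = 1 then (1 : Int) else 0)
      = (∑ m ∈ Finset.Icc 1 K, if m % 2 = 1 then (1 : Int) else 0) :=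
    Finset.sum_congr rfl (fun m hm => by
      simp only [Finset.mem_Icc] at hm
      refine if_congr ?_ rfl rfl
      constructor
      · rintro ⟨-, -, hp⟩; exact hp
      · intro hp; exact ⟨hm.1, hm.2, hp⟩)
  rw [← h1, h2, pv_count_odd_core K.toNat K le_rfl h0]

-- a foldl that adds under a test is the initial value plus a sum of guarded terms
theorem pv_foldl_add_if (c : Int → Prop) [DecidablePred c] (F : Int → Int) (l : List Int) (init : Int) :
    l.foldl (fun t g => if c g then t + F g else t) init
      = init + (l.map (fun g => if c g then F g else 0)).sum := by
  induction l generalizing init with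
  | nil => simp
  | cons a l ih =>
    simp only [List.foldl_cons, List.map_cons, List.sum_cons]
    split_ifs with h
    · rw [ih]; ring
    · rw [ih]; ring

-- one row of the all-pairs grid: the m with 1 ≤ m < n and m²+n²<x number min(n-1, isqrt(x-1-n·n))
theorem pv_row_all (x n : Int) (hx : 5 < x) (hn2 : 2 ≤ n) (hnK : n ≤ pvIsqrt (x - 2)) :
    min (n - 1) (pvIsqrt (x - 1 - n * n))
      = ∑ m ∈ Finset.Icc 1 x, if pvP x false false m n then (1 : Int) else 0 := by
  have hn2' : n ^ 2 ≤ x - 2 := by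
    have := (pv_le_isqrt_iff (by omega) (by omega : (0:Int) ≤ x - 2)).mp hnK
    nlinarith
  have hnn : n * n ≤ x - 2 := by nlinarith
  have hr0 : 0 ≤ pvIsqrt (x - 1 - n * n) := pv_isqrt_nonneg _
  have hrle : pvIsqrt (x - 1 - n * n) ≤ x - 1 - n * n := pv_isqrt_le_self (by omega)
  have hKx : n ≤ pvIsqrt (x - 2) := hnK
  have hKle : pvIsqrt (x - 2) ≤ x - 2 := pv_isqrt_le_self (by omega)
  rw [← pv_count_interval x (min (n - 1) (pvIsqrt (x - 1 - n * n)))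
      (le_min (by omega) hr0) (le_trans (min_le_left _ _) (by omega))]
  refine Finset.sum_congr rfl (fun m hm => ?_)
  simp only [Finset.mem_Icc] at hm
  refine if_congr ?_ rfl rfl
  unfold pvP
  constructor
  · rintro ⟨h1, h2⟩
    have hmr : m ≤ pvIsqrt (x - 1 - n * n) := le_trans h2 (min_le_right _ _)
    have hmn : m ≤ n - 1 := le_trans h2 (min_le_left _ _)
    have hm2 : m ^ 2 ≤ x - 1 - n * n := by
      have := (pv_le_isqrt_iff (by omega) (by omega : (0:Int) ≤ x - 1 - n * n)).mp hmr
      nlinarith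
    exact ⟨by omega, by nlinarith, Or.inl rfl, Or.inl rfl⟩
  · rintro ⟨hlt, hsum, -, -⟩
    have hm2 : m ^ 2 ≤ x - 1 - n * n := by nlinarith
    have := (pv_le_isqrt_iff (by omega) (by omega : (0:Int) ≤ x - 1 - n * n)).mpr hm2
    exact ⟨hm.1, le_min (by omega) this⟩

-- rows outside 2..isqrt(x-2) are empty
theorem pv_row_all_zero (x n : Int) (hn : 1 ≤ n ∧ n ≤ x) (hout : ¬(2 ≤ n ∧ n ≤ pvIsqrt (x - 2)))
    (hx : 5 < x) :
    (∑ m ∈ Finset.Icc 1 x, if pvP x false false m n then (1 : Int) else 0) = 0 := by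
  refine Finset.sum_eq_zero (fun m hm => ?_)
  simp only [Finset.mem_Icc] at hm
  rw [if_neg]
  rintro ⟨h1, h2, -, -⟩
  have hn2 : 2 ≤ n := by omega
  have hK : ¬ n ≤ pvIsqrt (x - 2) := by tauto
  have : ¬ n ^ 2 ≤ x - 2 := fun hc =>
    hK ((pv_le_isqrt_iff (by omega) (by omega : (0:Int) ≤ x - 2)).mpr hc)
  nlinarith [sq_nonneg (m - 1)]

-- the row-count loop of _allpairs computes pvCnt x false false
theorem pv_allpairs_eq (x : Int) (hx : 5 < x) : pvAllpairs x = pvCnt x false false := by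
  have hK0 : 0 ≤ pvIsqrt (x - 2) := pv_isqrt_nonneg _
  have hKle : pvIsqrt (x - 2) ≤ x - 2 := pv_isqrt_le_self (by omega)
  unfold pvAllpairs pvCnt
  rw [PySem.List.foldl_add, zero_add,
    pv_sum_map_pyRange _ ((pvIsqrt (x - 2) + 1 - 2).toNat) 2 _ le_rfl,
    show pvIsqrt (x - 2) + 1 - 1 = pvIsqrt (x - 2) from by ring]
  have hsub : (∑ n ∈ Finset.Icc 2 (pvIsqrt (x - 2)),
        ∑ m ∈ Finset.Icc 1 x, if pvP x false false m n then (1 : Int) else 0)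
      = ∑ n ∈ Finset.Icc 1 x, ∑ m ∈ Finset.Icc 1 x, if pvP x false false m n then (1 : Int) else 0 :=
    Finset.sum_subset (Finset.Icc_subset_Icc (by omega) (by omega)) (fun n hn hnn => by
      simp only [Finset.mem_Icc] at hn hnn
      exact pv_row_all_zero x n hn (by omega) hx)
  rw [← hsub]
  exact Finset.sum_congr rfl (fun n hn => by
    simp only [Finset.mem_Icc] at hn
    exact pv_row_all x n hx hn.1 hn.2)

-- one row of the both-odd grid
theorem pv_row_odd (x n : Int) (hx : 10 < x) (hn2 : 2 ≤ n) (hnK : n ≤ pvIsqrt (x - 2))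
    (hno : n % 2 = 1) :
    (min (n - 1) (pvIsqrt (x - 1 - n * n)) + 1) / 2
      = ∑ m ∈ Finset.Icc 1 x, if pvP x true false m n then (1 : Int) else 0 := by
  have hn2' : n ^ 2 ≤ x - 2 := by
    have := (pv_le_isqrt_iff (by omega) (by omega : (0:Int) ≤ x - 2)).mp hnK
    nlinarith
  have hnn : n * n ≤ x - 2 := by nlinarith
  have hr0 : 0 ≤ pvIsqrt (x - 1 - n * n) := pv_isqrt_nonneg _
  have hrle : pvIsqrt (x - 1 - n * n) ≤ x - 1 - n * n := pv_isqrt_le_self (by omega)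
  have hKle : pvIsqrt (x - 2) ≤ x - 2 := pv_isqrt_le_self (by omega)
  rw [← pv_count_odd_interval x (min (n - 1) (pvIsqrt (x - 1 - n * n)))
      (le_min (by omega) hr0) (le_trans (min_le_left _ _) (by omega))]
  refine Finset.sum_congr rfl (fun m hm => ?_)
  simp only [Finset.mem_Icc] at hm
  refine if_congr ?_ rfl rfl
  unfold pvP
  constructor
  · rintro ⟨h1, h2, h3⟩
    have hmr : m ≤ pvIsqrt (x - 1 - n * n) := le_trans h2 (min_le_right _ _)
    have hmn : m ≤ n - 1 := le_trans h2 (min_le_left _ _)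
    have hm2 : m ^ 2 ≤ x - 1 - n * n := by
      have := (pv_le_isqrt_iff (by omega) (by omega : (0:Int) ≤ x - 1 - n * n)).mp hmr
      nlinarith
    exact ⟨by omega, by nlinarith, Or.inr ⟨h3, hno⟩, Or.inl rfl⟩
  · rintro ⟨hlt, hsum, hpar, -⟩
    rcases hpar with h | ⟨hmo, -⟩
    · exact absurd h (by simp)
    · have hm2 : m ^ 2 ≤ x - 1 - n * n := by nlinarith
      exact ⟨hm.1,
        le_min (by omega) ((pv_le_isqrt_iff (by omega) (by omega : (0:Int) ≤ x - 1 - n * n)).mpr hm2),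
        hmo⟩

-- both-odd rows outside odd 3..isqrt(x-2) are empty
theorem pv_row_odd_zero (x n : Int) (hn : 1 ≤ n ∧ n ≤ x)
    (hout : ¬(3 ≤ n ∧ n ≤ pvIsqrt (x - 2) ∧ n % 2 = 1)) (hx : 10 < x) :
    (∑ m ∈ Finset.Icc 1 x, if pvP x true false m n then (1 : Int) else 0) = 0 := by
  refine Finset.sum_eq_zero (fun m hm => ?_)
  simp only [Finset.mem_Icc] at hm
  rw [if_neg]
  rintro ⟨h1, h2, hpar, -⟩
  rcases hpar with h | ⟨hmo, hno⟩
  · exact absurd h (by simp)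
  · have hn3 : 3 ≤ n := by omega
    have hK : ¬ n ≤ pvIsqrt (x - 2) := by tauto
    have : ¬ n ^ 2 ≤ x - 2 := fun hc =>
      hK ((pv_le_isqrt_iff (by omega) (by omega : (0:Int) ≤ x - 2)).mpr hc)
    nlinarith [sq_nonneg (m - 1)]

-- the row-count loop of _oddpairs computes pvCnt x true false
theorem pv_oddpairs_eq (x : Int) (hx : 10 < x) : pvOddpairs x = pvCnt x true false := by
  have hK0 : 0 ≤ pvIsqrt (x - 2) := pv_isqrt_nonneg _
  have hKle : pvIsqrt (x - 2) ≤ x - 2 := pv_isqrt_le_self (by omega)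
  unfold pvOddpairs pvCnt
  rw [show (fun (t n : Int) =>
        if PySem.Int.mod n 2 = 1 then
          t + PySem.Int.floordiv (min (n - 1) (pvIsqrt (x - 1 - n * n)) + 1) 2
        else t)
      = (fun t n =>
        if n % 2 = 1 then t + (min (n - 1) (pvIsqrt (x - 1 - n * n)) + 1) / 2 else t) from by
      funext t n
      rw [PySem.Int.mod_eq_emod_of_pos (by omega), PySem.Int.floordiv_eq_ediv_of_pos (by omega)],
    pv_foldl_add_if (fun n => n % 2 = 1) _ _ _, zero_add,
    pv_sum_map_pyRange _ ((pvIsqrt (x - 2) + 1 - 3).toNat) 3 _ le_rfl,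
    show pvIsqrt (x - 2) + 1 - 1 = pvIsqrt (x - 2) from by ring]
  have hsub : (∑ n ∈ Finset.Icc 3 (pvIsqrt (x - 2)),
        ∑ m ∈ Finset.Icc 1 x, if pvP x true false m n then (1 : Int) else 0)
      = ∑ n ∈ Finset.Icc 1 x, ∑ m ∈ Finset.Icc 1 x, if pvP x true false m n then (1 : Int) else 0 :=
    Finset.sum_subset (Finset.Icc_subset_Icc (by omega) (by omega)) (fun n hn hnn => by
      simp only [Finset.mem_Icc] at hn hnn
      exact pv_row_odd_zero x n hn (by omega) hx)
  rw [← hsub]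
  refine Finset.sum_congr rfl (fun n hn => ?_)
  simp only [Finset.mem_Icc] at hn
  split_ifs with hno
  · exact pv_row_odd x n hx (by omega) hn.2 hno
  · exact (pv_row_odd_zero x n (by omega) (by omega) hx).symm

-- scaled bound: m²+n²<x for (m,n)=(g·a,g·b) iff a²+b² < (x-1)//g² + 1
theorem pv_scale_iff {x g a b : Int} (hg : 1 ≤ g) :
    (g * a) ^ 2 + (g * b) ^ 2 < x ↔ a ^ 2 + b ^ 2 < (x - 1) / (g * g) + 1 := by
  have hgg : 0 < g * g := by positivity
  rw [Int.lt_add_one_iff, Int.le_ediv_iff_mul_le hgg]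
  constructor <;> intro h <;> nlinarith

-- multiplying by an odd number preserves parity
theorem pv_odd_mul {g : Int} (a : Int) (hg : g % 2 = 1) : (g * a) % 2 = a % 2 := by
  rw [Int.mul_emod, hg, one_mul, Int.emod_emod_of_dvd a (dvd_refl 2)]

-- one gcd class of pvCnt x po false is a coprime count with the scaled bound
theorem pv_class_eq (x : Int) (po : Bool) (g : Int) (hg : 1 ≤ g)
    (hpo : po = false ∨ g % 2 = 1) :
    (∑ n ∈ Finset.Icc 1 x, ∑ m ∈ Finset.Icc 1 x,
        if pvP x po false m n ∧ (Int.gcd m n : Int) = g then (1 : Int) else 0)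
      = pvCnt ((x - 1) / (g * g) + 1) po true := by
  have hgg : (0 : Int) < g * g := by positivity
  set y := (x - 1) / (g * g) + 1 with hy
  have e1 : (∑ n ∈ Finset.Icc 1 x, ∑ m ∈ Finset.Icc 1 x,
        if pvP x po false m n ∧ (Int.gcd m n : Int) = g then (1 : Int) else 0)
      = ∑ p ∈ Finset.Icc 1 x ×ˢ Finset.Icc 1 x,
          if pvP x po false p.2 p.1 ∧ (Int.gcd p.2 p.1 : Int) = g then (1 : Int) else 0 :=
    (Finset.sum_product' _ _ (fun n m =>
      if pvP x po false m n ∧ (Int.gcd m n : Int) = g then (1 : Int) else 0)).symm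
  have e2 : pvCnt y po true
      = ∑ p ∈ Finset.Icc 1 y ×ˢ Finset.Icc 1 y,
          if pvP y po true p.2 p.1 then (1 : Int) else 0 := by
    unfold pvCnt
    exact (Finset.sum_product' _ _ (fun n m =>
      if pvP y po true m n then (1 : Int) else 0)).symm
  rw [e1, e2, Finset.sum_boole, Finset.sum_boole]
  congr 1
  refine Finset.card_bij' (fun p _ => (p.1 / g, p.2 / g)) (fun q _ => (g * q.1, g * q.2)) ?_ ?_ ?_ ?_
  · -- forward membership
    rintro ⟨n, m⟩ hp
    simp only [Finset.mem_filter, Finset.mem_product, Finset.mem_Icc] at hp ⊢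
    obtain ⟨⟨⟨hn1, hnx⟩, ⟨hm1, hmx⟩⟩, ⟨hlt, hsum, hpar, -⟩, hgcd⟩ := hp
    have hdm : g ∣ m := hgcd ▸ Int.gcd_dvd_left m n
    have hdn : g ∣ n := hgcd ▸ Int.gcd_dvd_right m n
    have ha : m = g * (m / g) := (Int.mul_ediv_cancel' hdm).symm
    have hb : n = g * (n / g) := (Int.mul_ediv_cancel' hdn).symm
    have ha1 : 1 ≤ m / g := (Int.le_ediv_iff_mul_le (by omega)).mpr
      (by rw [one_mul]; exact Int.le_of_dvd (by omega) hdm)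
    have hb1 : 1 ≤ n / g := (Int.le_ediv_iff_mul_le (by omega)).mpr
      (by rw [one_mul]; exact Int.le_of_dvd (by omega) hdn)
    have hsum' : (m / g) ^ 2 + (n / g) ^ 2 < y := by
      rw [hy]
      exact (pv_scale_iff hg).mp (by rw [← ha, ← hb]; exact hsum)
    have hay : m / g ≤ y := by nlinarith [Int.le_self_sq (m / g), Int.le_self_sq (n / g)]
    have hby : n / g ≤ y := by nlinarith [Int.le_self_sq (m / g), Int.le_self_sq (n / g)]
    have hab : m / g < n / g := by
      by_contra hc
      have h1 : g * (n / g) ≤ g * (m / g) := mul_le_mul_of_nonneg_left (not_lt.mp hc) (by omega)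
      omega
    refine ⟨⟨⟨hb1, hby⟩, ⟨ha1, hay⟩⟩, hab, hsum', ?_, ?_⟩
    · rcases hpo with hf | hodd
      · exact Or.inl hf
      · rcases hpar with hf | ⟨hmo, hno⟩
        · exact Or.inl hf
        · refine Or.inr ⟨?_, ?_⟩
          · rw [← pv_odd_mul (m / g) hodd, ← ha]; exact hmo
          · rw [← pv_odd_mul (n / g) hodd, ← hb]; exact hno
    · refine Or.inr ?_
      have hgc : (Int.gcd (g * (m / g)) (g * (n / g)) : Int) = g := by rw [← ha, ← hb]; exact hgcd
      rw [Int.gcd_mul_left] at hgc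
      push_cast at hgc
      rw [abs_of_nonneg (by omega : (0 : Int) ≤ g)] at hgc
      have hc1 : g * ((Int.gcd (m / g) (n / g) : Int)) = g * 1 := by rw [mul_one]; exact hgc
      have : (Int.gcd (m / g) (n / g) : Int) = 1 := mul_left_cancel₀ (by omega) hc1
      exact_mod_cast this
  · -- backward membership
    rintro ⟨b, a⟩ hq
    simp only [Finset.mem_filter, Finset.mem_product, Finset.mem_Icc] at hq ⊢
    obtain ⟨⟨⟨hb1, hby⟩, ⟨ha1, hay⟩⟩, hlt, hsum, hpar, hcop⟩ := hq
    have hcop' : Int.gcd a b = 1 := by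
      rcases hcop with hf | h
      · exact absurd hf (by simp)
      · exact h
    have hsum' : (g * a) ^ 2 + (g * b) ^ 2 < x := by
      have := (pv_scale_iff hg).mpr (hy ▸ hsum)
      exact this
    have hga1 : 1 ≤ g * a := by nlinarith
    have hgb1 : 1 ≤ g * b := by nlinarith
    have hgax : g * a ≤ x := by nlinarith [Int.le_self_sq (g * a), Int.le_self_sq (g * b)]
    have hgbx : g * b ≤ x := by nlinarith [Int.le_self_sq (g * a), Int.le_self_sq (g * b)]
    refine ⟨⟨⟨hgb1, hgbx⟩, ⟨hga1, hgax⟩⟩, ⟨by nlinarith, hsum', ?_, Or.inl rfl⟩, ?_⟩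
    · rcases hpo with hf | hodd
      · exact Or.inl hf
      · rcases hpar with hf | ⟨hao, hbo⟩
        · exact Or.inl hf
        · exact Or.inr ⟨by rw [pv_odd_mul a hodd]; exact hao, by rw [pv_odd_mul b hodd]; exact hbo⟩
    · rw [Int.gcd_mul_left, hcop', mul_one]
      exact Int.natAbs_of_nonneg (by omega)
  · -- left inverse
    rintro ⟨n, m⟩ hp
    simp only [Finset.mem_filter, Finset.mem_product, Finset.mem_Icc] at hp
    obtain ⟨-, -, hgcd⟩ := hp
    have hdm : g ∣ m := hgcd ▸ Int.gcd_dvd_left m n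
    have hdn : g ∣ n := hgcd ▸ Int.gcd_dvd_right m n
    simp only [Prod.mk.injEq]
    exact ⟨Int.mul_ediv_cancel' hdn, Int.mul_ediv_cancel' hdm⟩
  · -- right inverse
    rintro ⟨b, a⟩ _
    simp only [Prod.mk.injEq]
    constructor <;> exact Int.mul_ediv_cancel_left _ (by omega)

-- partition of pvCnt x po false by the gcd
theorem pv_group (x : Int) (po : Bool) (G : Int)
    (hG : ∀ m n : Int, 1 ≤ m → 1 ≤ n → pvP x po false m n →
      1 ≤ (Int.gcd m n : Int) ∧ (Int.gcd m n : Int) ≤ G) :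
    pvCnt x po false
      = ∑ g ∈ Finset.Icc 1 G, ∑ n ∈ Finset.Icc 1 x, ∑ m ∈ Finset.Icc 1 x,
          if pvP x po false m n ∧ (Int.gcd m n : Int) = g then (1 : Int) else 0 := by
  unfold pvCnt
  rw [Finset.sum_comm (s := Finset.Icc 1 G)]
  refine Finset.sum_congr rfl (fun n hn => ?_)
  rw [Finset.sum_comm (s := Finset.Icc 1 G)]
  refine Finset.sum_congr rfl (fun m hm => ?_)
  simp only [Finset.mem_Icc] at hn hm
  by_cases hP : pvP x po false m n
  · have hmem := hG m n hm.1 hn.1 hP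
    have h1 : ∀ g ∈ Finset.Icc 1 G,
        (if pvP x po false m n ∧ (Int.gcd m n : Int) = g then (1 : Int) else 0)
          = if (Int.gcd m n : Int) = g then (1 : Int) else 0 :=
      fun g _ => if_congr (and_iff_right hP) rfl rfl
    rw [Finset.sum_congr rfl h1,
      Finset.sum_ite_eq (Finset.Icc 1 G) ((Int.gcd m n : Int)) (fun _ => (1 : Int)),
      if_pos (Finset.mem_Icc.mpr hmem), if_pos hP]
  · rw [if_neg hP, eq_comm]
    exact Finset.sum_eq_zero (fun g _ => if_neg (fun hc => hP hc.1))

-- a both-odd gcd class with even g is empty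
theorem pv_class_even_zero (x g : Int) (hge : g % 2 = 0) :
    (∑ n ∈ Finset.Icc 1 x, ∑ m ∈ Finset.Icc 1 x,
        if pvP x true false m n ∧ (Int.gcd m n : Int) = g then (1 : Int) else 0) = 0 := by
  refine Finset.sum_eq_zero (fun n _ => Finset.sum_eq_zero (fun m _ => ?_))
  rw [if_neg]
  rintro ⟨⟨-, -, hpar, -⟩, hgcd⟩
  rcases hpar with hf | ⟨hmo, -⟩
  · exact absurd hf (by simp)
  · obtain ⟨c, hc⟩ : g ∣ m := hgcd ▸ Int.gcd_dvd_left m n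
    have := Int.mul_emod g c 2
    rw [← hc, hge] at this
    omega

-- pvCnt is 0 below the smallest pair
theorem pv_cnt_zero {x : Int} (po pg : Bool) (hx : x ≤ 5) : pvCnt x po pg = 0 := by
  unfold pvCnt
  refine Finset.sum_eq_zero (fun n hn => Finset.sum_eq_zero (fun m hm => ?_))
  simp only [Finset.mem_Icc] at hn hm
  rw [if_neg]
  rintro ⟨h1, h2, -, -⟩
  nlinarith [sq_nonneg (m - 1), sq_nonneg (n - 2)]

theorem pv_cnt_odd_zero {x : Int} (pg : Bool) (hx : x ≤ 10) : pvCnt x true pg = 0 := by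
  unfold pvCnt
  refine Finset.sum_eq_zero (fun n hn => Finset.sum_eq_zero (fun m hm => ?_))
  simp only [Finset.mem_Icc] at hn hm
  rw [if_neg]
  rintro ⟨h1, h2, hpar, -⟩
  rcases hpar with h | ⟨hmo, hno⟩
  · exact absurd h (by simp)
  · have hn3 : 3 ≤ n := by omega
    nlinarith [sq_nonneg (m - 1), sq_nonneg (n - 3)]

-- B's recursion computes the coprime count (strong induction on x)
theorem pv_coprime_eq (k : ℕ) : ∀ x : Int, x.toNat ≤ k → pvCoprime x = pvCnt x false true := by
  induction k with
  | zero =>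
    intro x hk
    rw [pvCoprime, if_pos (by omega : x ≤ 5), pv_cnt_zero false true (by omega)]
  | succ k ih =>
    intro x hk
    rw [pvCoprime]
    split_ifs with h5
    · rw [pv_cnt_zero false true h5]
    · have hx6 : 6 ≤ x := by omega
      set G := pvIsqrt (PySem.Int.floordiv (x - 1) 5) with hG
      have hGe : G = pvIsqrt ((x - 1) / 5) := by
        rw [hG, PySem.Int.floordiv_eq_ediv_of_pos (by omega : (0:Int) < 5)]
      have hG1 : 1 ≤ G := by
        rw [hGe]
        have h15 : (1 : Int) ≤ (x - 1) / 5 := by omega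
        have := (pv_le_isqrt_iff (by omega : (0:Int) ≤ 1) (by omega : (0:Int) ≤ (x - 1) / 5)).mpr
          (by nlinarith)
        exact this
      rw [pv_foldl_sub, List.attach_map_val (l := PySem.List.pyRange 2 (G + 1) 1)
          (f := fun g => pvCoprime (PySem.Int.floordiv (x - 1) (g * g) + 1)),
        pv_sum_map_pyRange _ ((G + 1 - 2).toNat) 2 _ le_rfl,
        show G + 1 - 1 = G from by ring]
      have hterm : ∀ g ∈ Finset.Icc 2 G,
          pvCoprime (PySem.Int.floordiv (x - 1) (g * g) + 1) = pvCnt ((x - 1) / (g * g) + 1) false true := by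
        intro g hg
        simp only [Finset.mem_Icc] at hg
        have hlt := pv_shrink h5 hg.1
        rw [PySem.Int.floordiv_eq_ediv_of_pos (by nlinarith : (0:Int) < g * g)] at hlt ⊢
        exact ih _ (by omega)
      rw [Finset.sum_congr rfl hterm, pv_allpairs_eq x (by omega)]
      have hpart := pv_group x false G (by
        intro m n hm1 hn1 hP
        obtain ⟨hlt, hsum, -, -⟩ := hP
        have hgpos : 1 ≤ (Int.gcd m n : Int) := by
          have : Int.gcd m n ≠ 0 := fun hc => by
            have := Int.gcd_eq_zero_iff.mp hc
            omega
          omega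
        refine ⟨hgpos, ?_⟩
        set gg := (Int.gcd m n : Int) with hgg
        obtain ⟨a, ha⟩ : gg ∣ m := Int.gcd_dvd_left m n
        obtain ⟨b, hb⟩ : gg ∣ n := Int.gcd_dvd_right m n
        have ha1 : 1 ≤ a := by nlinarith
        have hb1 : 1 ≤ b := by nlinarith
        have hab : a < b := by
          by_contra hc
          have h1 : gg * b ≤ gg * a := mul_le_mul_of_nonneg_left (by omega) (by omega)
          omega
        have h5' : 5 ≤ a ^ 2 + b ^ 2 := by nlinarith
        have hg2 : gg ^ 2 * 5 ≤ x - 1 := by nlinarith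
        rw [hGe]
        refine (pv_le_isqrt_iff (by omega) (by omega : (0:Int) ≤ (x - 1) / 5)).mpr ?_
        exact (Int.le_ediv_iff_mul_le (by omega : (0:Int) < 5)).mpr (by nlinarith)) 
      rw [hpart, pv_Icc_insert (n := 1) (cap := G) (by omega),
        Finset.sum_insert (pv_not_mem_Icc_succ 1 G),
        show (1 : Int) + 1 = 2 from by norm_num]
      have hclass : ∀ g ∈ Finset.Icc 2 G,
          (∑ n ∈ Finset.Icc 1 x, ∑ m ∈ Finset.Icc 1 x,
            if pvP x false false m n ∧ (Int.gcd m n : Int) = g then (1 : Int) else 0)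
            = pvCnt ((x - 1) / (g * g) + 1) false true := by
        intro g hg
        simp only [Finset.mem_Icc] at hg
        exact pv_class_eq x false g (by omega) (Or.inl rfl)
      have hone : (∑ n ∈ Finset.Icc 1 x, ∑ m ∈ Finset.Icc 1 x,
            if pvP x false false m n ∧ (Int.gcd m n : Int) = 1 then (1 : Int) else 0)
          = pvCnt x false true := by
        have := pv_class_eq x false 1 le_rfl (Or.inl rfl)
        rw [this, show (x - 1) / (1 * 1) + 1 = x from by norm_num]
      rw [Finset.sum_congr rfl hclass, hone]
      ring

theorem pv_coprimeodd_eq (k : ℕ) : ∀ x : Int, x.toNat ≤ k → pvCoprimeOdd x = pvCnt x true true := by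
  induction k with
  | zero =>
    intro x hk
    rw [pvCoprimeOdd, if_pos (by omega : x ≤ 10), pv_cnt_odd_zero true (by omega)]
  | succ k ih =>
    intro x hk
    rw [pvCoprimeOdd]
    split_ifs with h10
    · rw [pv_cnt_odd_zero true h10]
    · have hx11 : 11 ≤ x := by omega
      set G := pvIsqrt (PySem.Int.floordiv (x - 1) 10) with hG
      have hGe : G = pvIsqrt ((x - 1) / 10) := by
        rw [hG, PySem.Int.floordiv_eq_ediv_of_pos (by omega : (0:Int) < 10)]
      have hG1 : 1 ≤ G := by
        rw [hGe]
        have h15 : (1 : Int) ≤ (x - 1) / 10 := by omega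
        exact (pv_le_isqrt_iff (by omega : (0:Int) ≤ 1)
          (by omega : (0:Int) ≤ (x - 1) / 10)).mpr (by nlinarith)
      have hfun : (fun (t : Int) (g : { a // a ∈ PySem.List.pyRange 3 (G + 1) 1 }) =>
            if PySem.Int.mod g.1 2 = 1 then
              t - pvCoprimeOdd (PySem.Int.floordiv (x - 1) (g.1 * g.1) + 1)
            else t)
          = (fun t g =>
            if g.1 % 2 = 1 then
              t - pvCoprimeOdd (PySem.Int.floordiv (x - 1) (g.1 * g.1) + 1)
            else t) := by
        funext t g
        rw [PySem.Int.mod_eq_emod_of_pos (by omega : (0:Int) < 2)]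
      rw [hfun, pv_foldl_sub_if (fun g : { a // a ∈ PySem.List.pyRange 3 (G + 1) 1 } => g.1 % 2 = 1)
          (fun g => pvCoprimeOdd (PySem.Int.floordiv (x - 1) (g.1 * g.1) + 1)),
        List.attach_map_val (l := PySem.List.pyRange 3 (G + 1) 1)
          (f := fun g =>
            if g % 2 = 1 then pvCoprimeOdd (PySem.Int.floordiv (x - 1) (g * g) + 1) else 0),
        pv_sum_map_pyRange _ ((G + 1 - 3).toNat) 3 _ le_rfl,
        show G + 1 - 1 = G from by ring]
      have hterm : ∀ g ∈ Finset.Icc 3 G,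
          (if g % 2 = 1 then pvCoprimeOdd (PySem.Int.floordiv (x - 1) (g * g) + 1) else 0)
            = (if g % 2 = 1 then pvCnt ((x - 1) / (g * g) + 1) true true else 0) := by
        intro g hg
        simp only [Finset.mem_Icc] at hg
        split_ifs with hodd
        · have hlt := pv_shrink (x := x) (g := g) (by omega) (by omega : 2 ≤ g)
          rw [PySem.Int.floordiv_eq_ediv_of_pos (by nlinarith : (0:Int) < g * g)] at hlt ⊢
          exact ih _ (by omega)
        · rfl
      rw [Finset.sum_congr rfl hterm, pv_oddpairs_eq x (by omega)]
      have hpart := pv_group x true G (by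
        intro m n hm1 hn1 hP
        obtain ⟨hlt, hsum, hpar, -⟩ := hP
        rcases hpar with hf | ⟨hmo, hno⟩
        · exact absurd hf (by simp)
        have hgpos : 1 ≤ (Int.gcd m n : Int) := by
          have : Int.gcd m n ≠ 0 := fun hc => by
            have := Int.gcd_eq_zero_iff.mp hc
            omega
          omega
        refine ⟨hgpos, ?_⟩
        set gg := (Int.gcd m n : Int) with hgg
        obtain ⟨a, ha⟩ : gg ∣ m := Int.gcd_dvd_left m n
        obtain ⟨b, hb⟩ : gg ∣ n := Int.gcd_dvd_right m n
        have ha1 : 1 ≤ a := by nlinarith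
        have hb1 : 1 ≤ b := by nlinarith
        have hggo : gg % 2 = 1 := by
          rcases Int.emod_two_eq gg with h | h
          · have := Int.mul_emod gg a 2
            rw [← ha, h] at this
            omega
          · exact h
        have hao : a % 2 = 1 := by
          have := pv_odd_mul a hggo
          rw [← ha] at this
          omega
        have hbo : b % 2 = 1 := by
          have := pv_odd_mul b hggo
          rw [← hb] at this
          omega
        have hab : a < b := by
          by_contra hc
          have h1 : gg * b ≤ gg * a := mul_le_mul_of_nonneg_left (by omega) (by omega)
          omega
        have hb3 : 3 ≤ b := by omega
        have h10' : 10 ≤ a ^ 2 + b ^ 2 := by nlinarith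
        have hg2 : gg ^ 2 * 10 ≤ x - 1 := by nlinarith
        rw [hGe]
        refine (pv_le_isqrt_iff (by omega) (by omega : (0:Int) ≤ (x - 1) / 10)).mpr ?_
        exact (Int.le_ediv_iff_mul_le (by omega : (0:Int) < 10)).mpr (by nlinarith))
      rw [hpart, pv_Icc_insert (n := 1) (cap := G) (by omega),
        Finset.sum_insert (pv_not_mem_Icc_succ 1 G),
        show (1 : Int) + 1 = 2 from by norm_num]
      have hclass : ∀ g ∈ Finset.Icc 2 G,
          (∑ n ∈ Finset.Icc 1 x, ∑ m ∈ Finset.Icc 1 x,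
            if pvP x true false m n ∧ (Int.gcd m n : Int) = g then (1 : Int) else 0)
            = (if g % 2 = 1 then pvCnt ((x - 1) / (g * g) + 1) true true else 0) := by
        intro g hg
        simp only [Finset.mem_Icc] at hg
        split_ifs with hodd
        · exact pv_class_eq x true g (by omega) (Or.inr hodd)
        · exact pv_class_even_zero x g (by omega)
      have hone : (∑ n ∈ Finset.Icc 1 x, ∑ m ∈ Finset.Icc 1 x,
            if pvP x true false m n ∧ (Int.gcd m n : Int) = 1 then (1 : Int) else 0)
          = pvCnt x true true := by
        have := pv_class_eq x true 1 le_rfl (Or.inr rfl)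
        rw [this, show (x - 1) / (1 * 1) + 1 = x from by norm_num]
      rw [Finset.sum_congr rfl hclass, hone]
      -- collapse Icc 2 G to Icc 3 G: the g = 2 term is zero
      have htail : (∑ g ∈ Finset.Icc 2 G, if g % 2 = 1 then pvCnt ((x - 1) / (g * g) + 1) true true else 0)
          = ∑ g ∈ Finset.Icc 3 G, if g % 2 = 1 then pvCnt ((x - 1) / (g * g) + 1) true true else 0 := by
        rcases le_or_gt 2 G with h2 | h2
        · rw [pv_Icc_insert (n := 2) (cap := G) h2,
            Finset.sum_insert (pv_not_mem_Icc_succ 2 G), if_neg (by omega), zero_add,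
            show (2 : Int) + 1 = 3 from by norm_num]
        · rw [Finset.Icc_eq_empty (by omega), Finset.Icc_eq_empty (by omega)]
      rw [htail]
      ring

-- A's double sum is the coprime count minus the coprime both-odd count
theorem pv_A_split (cap : Int) :
    (∑ a ∈ Finset.Icc 1 cap, ∑ j ∈ Finset.Icc (a + 1) cap, pvH cap a j)
      = pvCnt cap false true - pvCnt cap true true := by
  have key : ∀ a j : Int, (if a < j then pvH cap a j else 0)
      = (if pvP cap false true a j then (1 : Int) else 0)
        - (if pvP cap true true a j then (1 : Int) else 0) := by
    intro a j
    unfold pvH pvP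
    simp only [ne_eq, Prod.mk.injEq, not_and]
    by_cases h1 : a < j
    · by_cases h2 : a ^ 2 + j ^ 2 < cap
      · by_cases h3 : Int.gcd a j = 1
        · by_cases h4 : a % 2 = 1 ∧ j % 2 = 1
          · rw [if_pos h1, if_neg (fun hc => (hc.2.2 h4.1) h4.2),
              if_pos ⟨h1, h2, Or.inl trivial, Or.inr h3⟩,
              if_pos ⟨h1, h2, Or.inr h4, Or.inr h3⟩]
            norm_num
          · rw [if_pos h1, if_pos ⟨h2, h3, fun ha hj => h4 ⟨ha, hj⟩⟩,
              if_pos ⟨h1, h2, Or.inl trivial, Or.inr h3⟩,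
              if_neg (fun hc => hc.2.2.1.elim (fun hf => absurd hf (by simp)) (fun hb => h4 hb))]
            norm_num
        · rw [if_pos h1, if_neg (fun hc => h3 hc.2.1),
            if_neg (fun hc => hc.2.2.2.elim (fun hf => absurd hf (by simp)) (fun hg => h3 hg)),
            if_neg (fun hc => hc.2.2.2.elim (fun hf => absurd hf (by simp)) (fun hg => h3 hg))]
          norm_num
      · rw [if_pos h1, if_neg (fun hc => h2 hc.1),
          if_neg (fun hc => h2 hc.2.1), if_neg (fun hc => h2 hc.2.1)]
        norm_num
    · rw [if_neg h1, if_neg (fun hc => h1 hc.1), if_neg (fun hc => h1 hc.1)]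
      norm_num
  have e1 : ∀ a ∈ Finset.Icc 1 cap,
      (∑ j ∈ Finset.Icc (a + 1) cap, pvH cap a j)
        = ∑ j ∈ Finset.Icc 1 cap, (if a < j then pvH cap a j else 0) := by
    intro a ha
    simp only [Finset.mem_Icc] at ha
    have h1 : (∑ j ∈ Finset.Icc (a + 1) cap, (if a < j then pvH cap a j else 0))
        = ∑ j ∈ Finset.Icc 1 cap, (if a < j then pvH cap a j else 0) :=
      Finset.sum_subset (Finset.Icc_subset_Icc (by omega) le_rfl) (fun j hj hnj => by
        simp only [Finset.mem_Icc] at hj hnj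
        rw [if_neg]
        omega)
    rw [← h1]
    exact (Finset.sum_congr rfl (fun j hj => by
      simp only [Finset.mem_Icc] at hj
      rw [if_pos (by omega : a < j)])).symm
  have e2 : pvCnt cap false true - pvCnt cap true true
      = ∑ m ∈ Finset.Icc 1 cap, ∑ n ∈ Finset.Icc 1 cap,
          ((if pvP cap false true m n then (1 : Int) else 0)
            - (if pvP cap true true m n then (1 : Int) else 0)) := by
    unfold pvCnt
    rw [← Finset.sum_sub_distrib,
      Finset.sum_congr rfl (fun n _ => (Finset.sum_sub_distrib
        (f := fun m => if pvP cap false true m n then (1 : Int) else 0)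
        (g := fun m => if pvP cap true true m n then (1 : Int) else 0)).symm)]
    exact Finset.sum_comm
  rw [e2, Finset.sum_congr rfl e1]
  exact Finset.sum_congr rfl (fun a _ => Finset.sum_congr rfl (fun j _ => key a j))

-- ===== VERDICT (by name: the statement is the Claim_ definition above) =====
theorem tripct_spec : Claim_equal_tripct := by
  intro cap _
  unfold Spec_tripct tripct_alt
  rw [pv_A_eq, pv_A_split, pv_coprime_eq cap.toNat cap le_rfl, pv_coprimeodd_eq cap.toNat cap le_rfl]
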